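-- pv_equiv track=rewrite | github.com/deigen/checkerboardgen | cbgen/checkerboard.py | progressive_checkerboard_coords
-- ===== SOURCE A (Python) =====
-- def progressive_checkerboard_coords(size, x, y):
--     if size == 1:
--         return [(x, y)]
--
--     # divide into quadrants
--     d = size // 2
--
--     # create balanced lists for TL, BR, TR, BL
--     sublists = [
--         progressive_checkerboard_coords(d, xi, yi)
--         for xi, yi in [(x, y), (x + d, y + d), (x + d, y), (x, y + d)]
--     ]
--
--     # combine round-robin from the quadrants
--     return concat(zip(*sublists))
--
-- def concat(lists):
--     result = []
--     for lst in lists: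
--         result.extend(lst)
--     return result
-- ===== SOURCE B (Python) =====
-- def progressive_checkerboard_coords(size, x, y):
--     # direct index arithmetic: each output index decodes, base-4 digit by digit,
--     # which quadrant to enter at each scale (no recursion, no list recopying)
--     scales = []
--     s = size
--     while s > 1:
--         s = s // 2
--         scales.append(s)
--     offsets = ((0, 0), (1, 1), (1, 0), (0, 1))
--     out = []
--     for i in range(4 ** len(scales)):
--         cx, cy = x, y
--         j = i
--         for d in scales:
--             ox, oy = offsets[j % 4]
--             cx += ox * d
--             cy += oy * d
--             j = j // 4
--         out.append((cx, cy))
--     return out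
-- ===== Notes on version B (the rewrite author's own statement) =====
-- stated objective: alternative
-- what changed: replaces A's recursive quadrant splitting with per-level zip/concat recopying by a single flat loop that decodes each output index's base-4 digits into per-scale quadrant offsets
import Mathlib
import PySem

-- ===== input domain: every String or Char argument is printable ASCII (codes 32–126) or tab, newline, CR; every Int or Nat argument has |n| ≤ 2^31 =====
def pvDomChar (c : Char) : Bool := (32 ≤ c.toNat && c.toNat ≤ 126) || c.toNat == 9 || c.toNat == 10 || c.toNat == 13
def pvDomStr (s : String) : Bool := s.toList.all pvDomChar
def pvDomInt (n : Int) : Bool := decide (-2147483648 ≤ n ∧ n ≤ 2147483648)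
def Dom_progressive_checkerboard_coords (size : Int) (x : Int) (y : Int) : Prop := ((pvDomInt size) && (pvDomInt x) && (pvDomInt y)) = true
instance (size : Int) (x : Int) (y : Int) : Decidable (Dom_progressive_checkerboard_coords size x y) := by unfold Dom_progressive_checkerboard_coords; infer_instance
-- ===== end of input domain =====

-- B replaces A's recursive quadrant-splitting (with zip/concat recopying at every level)
-- by one flat loop that decodes each output index's base-4 digits into per-scale quadrant
-- offsets (objective: alternative algorithm, similar cost).

-- ===== PORT A =====

-- zip(*sublists) for the four equal-length quadrant lists (zip stops at the shortest list)
def pvZip4 {α : Type} : List α → List α → List α → List α → List (α × α × α × α)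
  | a :: as, b :: bs, c :: cs, d :: ds => (a, b, c, d) :: pvZip4 as bs cs ds
  | _, _, _, _ => []

-- concat: result = []; for lst in lists: result.extend(lst)  (each lst is a 4-tuple here)
def pvConcat {α : Type} (ts : List (α × α × α × α)) : List α :=
  ts.foldl (fun r t => r ++ [t.1, t.2.1, t.2.2.1, t.2.2.2]) []

def progressive_checkerboard_coords (size : Int) (x : Int) (y : Int) : List (Int × Int) :=
  if size = 1 then [(x, y)]
  else if size ≤ 1 then []  -- totality guard only: Python recurses forever here (size ≤ 0), outside Pre_
  else
    let d := PySem.Int.floordiv size 2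
    pvConcat (pvZip4 (progressive_checkerboard_coords d x y)
                     (progressive_checkerboard_coords d (x + d) (y + d))
                     (progressive_checkerboard_coords d (x + d) y)
                     (progressive_checkerboard_coords d x (y + d)))
termination_by size.toNat
decreasing_by
  all_goals
    rw [PySem.Int.floordiv_eq_ediv_of_pos (by omega : (0:Int) < 2)]
    omega

-- ===== PORT B =====

-- scales = []; s = size; while s > 1: s //= 2; scales.append(s)
def pvScales (s : Int) : List Int :=
  if 1 < s then
    let s2 := PySem.Int.floordiv s 2
    s2 :: pvScales s2
  else []
termination_by s.toNat
decreasing_by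
  rw [PySem.Int.floordiv_eq_ediv_of_pos (by omega : (0:Int) < 2)]
  omega

def pvOffsets : List (Int × Int) := [(0, 0), (1, 1), (1, 0), (0, 1)]

-- the inner loop: cx, cy = x, y; j = i; for d in scales: ox, oy = offsets[j % 4]; …; j //= 4
def pvDecode (i : Int) (scales : List Int) (x : Int) (y : Int) : Int × Int :=
  let st := scales.foldl
    (fun (st : Int × Int × Int) d =>
      let off := PySem.List.pyGetD pvOffsets (PySem.Int.mod st.2.2 4) (0, 0)
      (st.1 + off.1 * d, st.2.1 + off.2 * d, PySem.Int.floordiv st.2.2 4))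
    (x, y, i)
  (st.1, st.2.1)

def progressive_checkerboard_coords_alt (size : Int) (x : Int) (y : Int) : List (Int × Int) :=
  let scales := pvScales size
  (PySem.List.pyRange 0 ((4 : Int) ^ scales.length) 1).map (fun i => pvDecode i scales x y)

-- ===== PRECONDITION & SPEC =====
-- Pre_ excludes size ≤ 0, where Python A recurses forever (RecursionError); A returns on every size ≥ 1.
def Pre_progressive_checkerboard_coords (size : Int) (x : Int) (y : Int) : Prop := 1 ≤ size
instance (size : Int) (x : Int) (y : Int) : Decidable (Pre_progressive_checkerboard_coords size x y) := by unfold Pre_progressive_checkerboard_coords; infer_instance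
def pvWitness_progressive_checkerboard_coords : Int × Int × Int := (4, -2, 5)

def Spec_progressive_checkerboard_coords (size : Int) (x : Int) (y : Int) (out : List (Int × Int)) : Prop := out = progressive_checkerboard_coords_alt size x y
instance (size : Int) (x : Int) (y : Int) (out : List (Int × Int)) : Decidable (Spec_progressive_checkerboard_coords size x y out) := by unfold Spec_progressive_checkerboard_coords; infer_instance

-- ===== CLAIM (what is proved, stated in full; the proofs are below) =====
def Claim_equal_progressive_checkerboard_coords : Prop := ∀ (size : Int) (x : Int) (y : Int), Dom_progressive_checkerboard_coords size x y → Pre_progressive_checkerboard_coords size x y → Spec_progressive_checkerboard_coords size x y (progressive_checkerboard_coords size x y)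

-- ===== LEMMAS AND PROOFS =====

theorem pvScales_one : pvScales 1 = [] := by
  unfold pvScales; simp

theorem pvScales_of_lt (s : Int) (h : 1 < s) :
    pvScales s = PySem.Int.floordiv s 2 :: pvScales (PySem.Int.floordiv s 2) := by
  rw [pvScales]; simp [h]

-- one step of B's digit loop
theorem pvDecode_cons (i d : Int) (sc : List Int) (x y : Int) :
    pvDecode i (d :: sc) x y =
      pvDecode (PySem.Int.floordiv i 4) sc
        (x + (PySem.List.pyGetD pvOffsets (PySem.Int.mod i 4) (0, 0)).1 * d)
        (y + (PySem.List.pyGetD pvOffsets (PySem.Int.mod i 4) (0, 0)).2 * d) := rfl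

-- B's digit loop on a natural index, with the first digit resolved to the four quadrant cases
theorem pvDecode_cons_nat (i : Nat) (d : Int) (sc : List Int) (x y : Int) :
    pvDecode (i : Int) (d :: sc) x y =
      (if i % 4 = 0 then pvDecode ((i / 4 : Nat) : Int) sc x y
       else if i % 4 = 1 then pvDecode ((i / 4 : Nat) : Int) sc (x + d) (y + d)
       else if i % 4 = 2 then pvDecode ((i / 4 : Nat) : Int) sc (x + d) y
       else pvDecode ((i / 4 : Nat) : Int) sc x (y + d)) := by
  rw [pvDecode_cons]
  rw [show PySem.Int.mod (i : Int) 4 = ((i % 4 : Nat) : Int) from PySem.Int.mod_natCast i 4]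
  rw [show PySem.Int.floordiv (i : Int) 4 = ((i / 4 : Nat) : Int) from PySem.Int.floordiv_natCast i 4]
  rcases (by omega : i % 4 = 0 ∨ i % 4 = 1 ∨ i % 4 = 2 ∨ i % 4 = 3) with h | h | h | h <;>
    simp [h, pvOffsets, PySem.List.pyGetD, PySem.List.pyGet?, PySem.List.pyIdx?]

theorem pvConcat_append {α : Type} (ts : List (α × α × α × α)) (t : α × α × α × α) :
    pvConcat (ts ++ [t]) = pvConcat ts ++ [t.1, t.2.1, t.2.2.1, t.2.2.2] := by
  unfold pvConcat
  rw [List.foldl_append]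
  simp

theorem pvZip4_append {α : Type} (a b c d : List α) (p q r s : α)
    (hb : b.length = a.length) (hc : c.length = a.length) (hd : d.length = a.length) :
    pvZip4 (a ++ [p]) (b ++ [q]) (c ++ [r]) (d ++ [s]) = pvZip4 a b c d ++ [(p, q, r, s)] := by
  induction a generalizing b c d with
  | nil =>
    match b, c, d with
    | [], [], [] => rfl
  | cons ha ta ih =>
    match b, c, d with
    | hb' :: tb, hc' :: tc, hd' :: td =>
      simp only [List.cons_append, pvZip4, List.length_cons] at *
      rw [ih tb tc td (by omega) (by omega) (by omega)]

-- round-robin interleaving of four maps over range n is one map over range (4*n)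
theorem pvInterleave {α : Type} (n : Nat) (g0 g1 g2 g3 : Nat → α) :
    pvConcat (pvZip4 ((List.range n).map g0) ((List.range n).map g1)
                     ((List.range n).map g2) ((List.range n).map g3))
      = (List.range (4 * n)).map
          (fun i => if i % 4 = 0 then g0 (i / 4)
                    else if i % 4 = 1 then g1 (i / 4)
                    else if i % 4 = 2 then g2 (i / 4)
                    else g3 (i / 4)) := by
  induction n with
  | zero => rfl
  | succ m ih =>
    rw [List.range_succ, show 4 * (m + 1) = 4 * m + 4 by ring, List.range_add]
    simp only [List.map_append, List.map_cons, List.map_nil]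
    rw [pvZip4_append _ _ _ _ _ _ _ _ (by simp) (by simp) (by simp), pvConcat_append, ih]
    congr 1
    have e : List.range 4 = [0, 1, 2, 3] := by decide
    rw [e]
    simp only [List.map_cons, List.map_nil]
    norm_num [Nat.add_mul_mod_self_left, Nat.mul_add_div]

-- bridge: B's pyRange over 4^k as a List.range map
theorem pvAlt_eq_range (size x y : Int) :
    progressive_checkerboard_coords_alt size x y
      = (List.range (4 ^ (pvScales size).length)).map
          (fun i : Nat => pvDecode (i : Int) (pvScales size) x y) := by
  show (PySem.List.pyRange 0 ((4 : Int) ^ (pvScales size).length) 1).map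
        (fun i => pvDecode i (pvScales size) x y) = _
  rw [PySem.List.pyRange_one]
  have hN : (((4 : Int) ^ (pvScales size).length) - 0).toNat = 4 ^ (pvScales size).length := by
    rw [Int.sub_zero,
        show ((4 : Int) ^ (pvScales size).length) = ((4 ^ (pvScales size).length : Nat) : Int) by
          push_cast; ring,
        Int.toNat_natCast]
  rw [hN, List.map_map]
  apply List.map_congr_left
  intro i _
  simp

-- main induction: A equals the flat decoded map for every size ≥ 1
theorem pvMain : ∀ (m : Nat) (size x y : Int), size.toNat = m → 1 ≤ size →
    progressive_checkerboard_coords size x y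
      = (List.range (4 ^ (pvScales size).length)).map
          (fun i : Nat => pvDecode (i : Int) (pvScales size) x y) := by
  intro m
  induction m using Nat.strong_induction_on with
  | _ m ih =>
    intro size x y hm hs
    by_cases h1 : size = 1
    · subst h1
      rw [progressive_checkerboard_coords]
      simp [pvScales_one, pvDecode]
    · have h2 : 1 < size := by omega
      have hd2 : PySem.Int.floordiv size 2 = size / 2 :=
        PySem.Int.floordiv_eq_ediv_of_pos (by omega)
      have hdpos : 1 ≤ PySem.Int.floordiv size 2 := by rw [hd2]; omega
      have hdlt : (PySem.Int.floordiv size 2).toNat < m := by rw [hd2]; omega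
      rw [progressive_checkerboard_coords]
      simp only [h1, if_false, show ¬ size ≤ 1 by omega, if_false]
      set d := PySem.Int.floordiv size 2 with hdd
      rw [ih _ hdlt d x y rfl hdpos, ih _ hdlt d (x + d) (y + d) rfl hdpos,
          ih _ hdlt d (x + d) y rfl hdpos, ih _ hdlt d x (y + d) rfl hdpos]
      rw [pvInterleave]
      rw [pvScales_of_lt size h2, ← hdd]
      simp only [List.length_cons, pow_succ]
      rw [show 4 ^ (pvScales d).length * 4 = 4 * 4 ^ (pvScales d).length by ring]
      apply List.map_congr_left
      intro i _
      rw [pvDecode_cons_nat]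

-- ===== VERDICT (by name: the statement is the Claim_ definition above) =====
theorem progressive_checkerboard_coords_spec : Claim_equal_progressive_checkerboard_coords := by
  intro size x y _ hpre
  unfold Spec_progressive_checkerboard_coords
  rw [pvAlt_eq_range, pvMain size.toNat size x y rfl hpre]
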